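-- pv_equiv track=rewrite | github.com/ashishishu286/Rhyme-AI | rhyme_engine.py | rhyme_section
-- ===== SOURCE A (Python) =====
-- def rhyme_section(p1, p2):
--     if len(p1) <= len(p2):
--         shorter = p1
--         longer = p2
--     else:
--         shorter = p2
--         longer = p1
--
--     max_score = 0
--     n = len(shorter)
--     m = len(longer)
--
--     best_segment = []
--
--     for start in range(m - n + 1):
--         score = 0
--         temp = []
--
--         for i in range(n):
--             if shorter[i] == longer[start + i]:
--                 score += 1
--                 temp.append(shorter[i])
--             else:
--                 break
--
--         if score > max_score:
--             max_score = score
--             best_segment = temp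
--
--     return best_segment
-- ===== SOURCE B (Python) =====
-- def rhyme_section(p1, p2):
--     if len(p1) <= len(p2):
--         shorter, longer = p1, p2
--     else:
--         shorter, longer = p2, p1
--     if not shorter:
--         return []
--     n, m = len(shorter), len(longer)
--     # Z-algorithm over shorter + [None] + longer: z[j] = longest common
--     # prefix of s and s[j:], computed in O(n + m).
--     s = list(shorter) + [None] + list(longer)
--     N = len(s)
--     z = [0] * N
--     l = r = 0
--     for i in range(1, N):
--         k = min(r - i, z[i - l]) if i < r else 0
--         while i + k < N and s[k] == s[i + k]:
--             k += 1
--         z[i] = k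
--         if i + k > r:
--             l, r = i, i + k
--     best = 0
--     for start in range(m - n + 1):
--         v = z[n + 1 + start]
--         if v > best:
--             best = v
--     return shorter[:best]
-- ===== Notes on version B (the rewrite author's own statement) =====
-- stated objective: alternative
-- what changed: Replaces the nested per-window rescan by the Z-algorithm on shorter+[None]+longer, reading each window's prefix-match length off the Z-array; worst case drops from O(n*m) to O(n+m), though on the benchmark's inputs A's inner loop breaks early so no wall-clock speed-up was measured.
import Mathlib
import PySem

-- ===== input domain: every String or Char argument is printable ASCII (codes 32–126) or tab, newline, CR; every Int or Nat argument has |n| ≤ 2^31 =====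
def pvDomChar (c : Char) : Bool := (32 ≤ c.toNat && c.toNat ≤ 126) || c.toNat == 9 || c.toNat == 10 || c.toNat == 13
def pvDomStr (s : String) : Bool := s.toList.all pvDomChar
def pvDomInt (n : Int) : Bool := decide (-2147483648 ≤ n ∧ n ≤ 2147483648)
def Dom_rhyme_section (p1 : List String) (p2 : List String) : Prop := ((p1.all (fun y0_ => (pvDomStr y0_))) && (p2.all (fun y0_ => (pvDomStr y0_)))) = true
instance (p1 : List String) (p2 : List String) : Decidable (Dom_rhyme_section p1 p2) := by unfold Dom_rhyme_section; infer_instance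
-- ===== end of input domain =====

-- B replaces A's nested per-window scan by the Z-algorithm on shorter+[None]+longer (objective: alternative).

-- ===== PORT A =====
-- A's inner loop 'for i in range(n): if shorter[i] == longer[start+i]: score += 1; temp.append(...)
-- else: break', walking the remainder of shorter; the 'none' branch is unreachable in A's loop
-- (there start + i < len(longer) always holds) and corresponds to the loop stopping.
def aInner (longer : List String) : List String → Nat → Nat → List String → Nat × List String
  | [], _, score, temp => (score, temp)
  | x :: rest, idx, score, temp =>
    match longer[idx]? with
    | some y => if x = y then aInner longer rest (idx + 1) (score + 1) (temp ++ [x]) else (score, temp)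
    | none => (score, temp)

def rhyme_section (p1 : List String) (p2 : List String) : List String :=
  let shorter := if p1.length ≤ p2.length then p1 else p2
  let longer := if p1.length ≤ p2.length then p2 else p1
  let n := shorter.length
  let m := longer.length
  let res := (List.range (m - n + 1)).foldl
    (fun (acc : Nat × List String) start =>
      let st := aInner longer shorter start 0 []
      if st.1 > acc.1 then st else acc) (0, [])
  res.2

-- ===== PORT B =====
-- Source B's inner 'while i + k < N and s[k] == s[i + k]: k += 1'
def zExtend (s : List (Option String)) (i : Nat) (k : Nat) : Nat :=
  if h : i + k < s.length ∧ s[k]? = s[i + k]? then zExtend s i (k + 1) else k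
termination_by s.length - (i + k)
decreasing_by omega

-- one iteration of Source B's 'for i in range(1, N)' loop on the state (z, l, r); every list index
-- Source B takes here is in range, so getElem?/getD/setIfInBounds are exact for them
def zStep (s : List (Option String)) (st : Array Nat × Nat × Nat) (i : Nat) : Array Nat × Nat × Nat :=
  let k := zExtend s i (if i < st.2.2 then min (st.2.2 - i) (st.1[i - st.2.1]?.getD 0) else 0)
  if i + k > st.2.2 then (st.1.setIfInBounds i k, i, i + k)
  else (st.1.setIfInBounds i k, st.2.1, st.2.2)

def zGo (s : List (Option String)) (i : Nat) (st : Array Nat × Nat × Nat) : Array Nat × Nat × Nat :=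
  if h : i < s.length then zGo s (i + 1) (zStep s st i) else st
termination_by s.length - i

def zArr (s : List (Option String)) : Array Nat :=
  (zGo s 1 (Array.replicate s.length 0, 0, 0)).1

def rhyme_section_alt (p1 : List String) (p2 : List String) : List String :=
  let shorter := if p1.length ≤ p2.length then p1 else p2
  let longer := if p1.length ≤ p2.length then p2 else p1
  if shorter.isEmpty then [] else
  let n := shorter.length
  let m := longer.length
  let s := shorter.map some ++ none :: longer.map some
  let z := zArr s
  let best := (List.range (m - n + 1)).foldl
    (fun b start =>
      let v := z[n + 1 + start]?.getD 0
      if v > b then v else b) 0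
  shorter.take best

-- ===== PRECONDITION & SPEC =====
def Spec_rhyme_section (p1 : List String) (p2 : List String) (out : List String) : Prop := out = rhyme_section_alt p1 p2
instance (p1 : List String) (p2 : List String) (out : List String) : Decidable (Spec_rhyme_section p1 p2 out) := by unfold Spec_rhyme_section; infer_instance

-- ===== CLAIM (what is proved, stated in full; the proofs are below) =====
def Claim_equal_rhyme_section : Prop := ∀ (p1 : List String) (p2 : List String), Dom_rhyme_section p1 p2 → Spec_rhyme_section p1 p2 (rhyme_section p1 p2)

-- ===== LEMMAS AND PROOFS =====

/-- length of the longest common prefix of two lists -/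
def lcpLen {α : Type} [DecidableEq α] : List α → List α → Nat
  | [], _ => 0
  | _ :: _, [] => 0
  | a :: as, b :: bs => if a = b then lcpLen as bs + 1 else 0

theorem lcp_nil_right {α : Type} [DecidableEq α] (xs : List α) : lcpLen xs [] = 0 := by
  cases xs <;> rfl

theorem lcp_ge_iff {α : Type} [DecidableEq α] (xs : List α) :
    ∀ (ys : List α) (k : Nat),
      (k ≤ lcpLen xs ys ↔ ∀ j < k, xs[j]? = ys[j]? ∧ (xs[j]?).isSome) := by
  induction xs with
  | nil =>
    intro ys k
    simp only [lcpLen, Nat.le_zero]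
    constructor
    · rintro rfl j hj; omega
    · intro h
      by_contra hk
      have := h 0 (by omega)
      simp at this
  | cons a as ih =>
    intro ys k
    cases ys with
    | nil =>
      simp only [lcpLen, Nat.le_zero]
      constructor
      · rintro rfl j hj; omega
      · intro h
        by_contra hk
        have := h 0 (by omega)
        simp at this
    | cons b bs =>
      by_cases hab : a = b
      · subst hab
        cases k with
        | zero => simp
        | succ k' =>
          rw [show lcpLen (a :: as) (a :: bs) = lcpLen as bs + 1 from by simp [lcpLen]]
          constructor
          · intro h j hj
            cases j with
            | zero => simp
            | succ j' =>
              have := (ih bs k').1 (by omega) j' (by omega)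
              simpa using this
          · intro h
            have hk' : k' ≤ lcpLen as bs := (ih bs k').2 (fun j hj => by
              have := h (j + 1) (by omega)
              simpa using this)
            omega
      · simp only [lcpLen, if_neg hab, Nat.le_zero]
        constructor
        · rintro rfl j hj; omega
        · intro h
          by_contra hk
          have := h 0 (by omega)
          simp [hab] at this

theorem lcp_spec {α : Type} [DecidableEq α] (xs ys : List α) :
    ∀ j < lcpLen xs ys, xs[j]? = ys[j]? ∧ (xs[j]?).isSome :=
  (lcp_ge_iff xs ys (lcpLen xs ys)).1 le_rfl

theorem zExtend_aux (s : List (Option String)) (i : Nat) :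
    ∀ d k, lcpLen s (s.drop i) - k = d → k ≤ lcpLen s (s.drop i) →
      zExtend s i k = lcpLen s (s.drop i) := by
  intro d
  induction d with
  | zero =>
    intro k hd hk
    have hkL : k = lcpLen s (s.drop i) := by omega
    rw [zExtend]
    split
    · rename_i hc
      exfalso
      obtain ⟨h1, h2⟩ := hc
      have hnew : k + 1 ≤ lcpLen s (s.drop i) := by
        apply (lcp_ge_iff s (s.drop i) (k + 1)).2
        intro j hj
        rcases Nat.lt_or_ge j k with hjk | hjk
        · exact lcp_spec s (s.drop i) j (by omega)
        · have hjk' : j = k := by omega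
          subst hjk'
          refine ⟨by rw [List.getElem?_drop]; exact h2, ?_⟩
          rw [h2]
          simp only [Option.isSome_iff_exists]
          exact ⟨s[i + j]'h1, List.getElem?_eq_getElem h1⟩
      omega
    · exact hkL
  | succ d ihd =>
    intro k hd hk
    have hkL : k < lcpLen s (s.drop i) := by omega
    have hsp := lcp_spec s (s.drop i) k hkL
    rw [List.getElem?_drop] at hsp
    have hlt : i + k < s.length := by
      have h2 : (s[i + k]?).isSome := by rw [← hsp.1]; exact hsp.2
      simpa using h2
    rw [zExtend]
    split
    · exact ihd (k + 1) (by omega) (by omega)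
    · rename_i hc
      exact absurd ⟨hlt, hsp.1⟩ hc

theorem zExtend_eq (s : List (Option String)) (i : Nat) (k : Nat)
    (hk : k ≤ lcpLen s (s.drop i)) : zExtend s i k = lcpLen s (s.drop i) :=
  zExtend_aux s i _ k rfl hk

theorem k0_le (s : List (Option String)) (i l r : Nat)
    (hli : l < i) (hir : i < r) (hr : r = l + lcpLen s (s.drop l)) :
    min (r - i) (lcpLen s (s.drop (i - l))) ≤ lcpLen s (s.drop i) := by
  apply (lcp_ge_iff s (s.drop i) _).2
  intro j hj
  have hj1 : j < lcpLen s (s.drop (i - l)) := by omega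
  have h1 := lcp_spec s (s.drop (i - l)) j hj1
  rw [List.getElem?_drop] at h1
  have hj2 : (i - l) + j < lcpLen s (s.drop l) := by omega
  have h2 := lcp_spec s (s.drop l) ((i - l) + j) hj2
  rw [List.getElem?_drop] at h2
  refine ⟨?_, h1.2⟩
  rw [List.getElem?_drop, h1.1, h2.1]
  congr 1
  omega

theorem zGo_aux (s : List (Option String)) :
    ∀ (d i : Nat) (z : Array Nat) (l r : Nat), s.length - i = d → 1 ≤ i →
      z.size = s.length →
      (∀ j, 1 ≤ j → j < i → z[j]?.getD 0 = lcpLen s (s.drop j)) →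
      (i < r → 1 ≤ l ∧ l < i ∧ r = l + lcpLen s (s.drop l)) →
      (zGo s i (z, l, r)).1.size = s.length ∧
        ∀ j, 1 ≤ j → j < s.length → (zGo s i (z, l, r)).1[j]?.getD 0 = lcpLen s (s.drop j) := by
  intro d
  induction d with
  | zero =>
    intro i z l r hd hi hz hprev hw
    rw [zGo, dif_neg (by omega)]
    exact ⟨hz, fun j h1 h2 => hprev j h1 (by omega)⟩
  | succ d ihd =>
    intro i z l r hd hi hz hprev hw
    have hiN : i < s.length := by omega
    rw [zGo, dif_pos hiN]
    have hk : zExtend s i (if i < r then min (r - i) (z[i - l]?.getD 0) else 0)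
        = lcpLen s (s.drop i) := by
      apply zExtend_eq
      by_cases hir : i < r
      · rw [if_pos hir]
        obtain ⟨hl1, hl2, hl3⟩ := hw hir
        rw [hprev (i - l) (by omega) (by omega)]
        exact k0_le s i l r hl2 hir hl3
      · rw [if_neg hir]
        exact Nat.zero_le _
    have hprev' : ∀ j, 1 ≤ j → j < i + 1 →
        (z.setIfInBounds i (lcpLen s (s.drop i)))[j]?.getD 0 = lcpLen s (s.drop j) := by
      intro j h1 h2
      rcases Nat.lt_or_ge j i with hji | hji
      · have hne : i ≠ j := by omega
        rw [show (z.setIfInBounds i (lcpLen s (s.drop i)))[j]? = z[j]? from by simp [hne]]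
        exact hprev j h1 hji
      · have hji' : j = i := by omega
        subst hji'
        have hjlt : j < z.size := by omega
        simp [hjlt]
    simp only [zStep]
    rw [hk]
    by_cases hbr : i + lcpLen s (s.drop i) > r
    · rw [if_pos hbr]
      exact ihd (i + 1) (z.setIfInBounds i (lcpLen s (s.drop i))) i (i + lcpLen s (s.drop i))
        (by omega) (by omega) (by rw [Array.size_setIfInBounds]; exact hz) hprev'
        (fun _ => ⟨by omega, by omega, rfl⟩)
    · rw [if_neg hbr]
      refine ihd (i + 1) (z.setIfInBounds i (lcpLen s (s.drop i))) l r
        (by omega) (by omega) (by rw [Array.size_setIfInBounds]; exact hz) hprev' ?_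
      intro h
      obtain ⟨hl1, hl2, hl3⟩ := hw (by omega)
      exact ⟨hl1, by omega, hl3⟩

theorem zArr_correct (s : List (Option String)) (j : Nat) (hj : 1 ≤ j) :
    (zArr s)[j]?.getD 0 = lcpLen s (s.drop j) := by
  have h := zGo_aux s (s.length - 1) 1 (Array.replicate s.length 0) 0 0 rfl le_rfl
    (by simp) (by intro j h1 h2; exact absurd h2 (by omega))
    (by intro hcon; exact absurd hcon (by omega))
  rcases Nat.lt_or_ge j s.length with hjN | hjN
  · exact h.2 j hj hjN
  · unfold zArr
    rw [List.drop_eq_nil_of_le hjN, lcp_nil_right]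
    rw [Array.getElem?_eq_none (by rw [h.1]; omega)]
    rfl

theorem lcp_sep (xs : List String) :
    ∀ (ys : List String) (t : List (Option String)),
      lcpLen (xs.map some ++ none :: t) (ys.map some) = lcpLen xs ys := by
  induction xs with
  | nil =>
    intro ys t
    cases ys with
    | nil => simp [lcpLen]
    | cons b bs => simp [lcpLen]
  | cons a as ih =>
    intro ys t
    cases ys with
    | nil => simp [lcpLen]
    | cons b bs =>
      simp only [List.map_cons, List.cons_append, lcpLen]
      by_cases hab : a = b
      · simp [hab, ih bs t]
      · simp [hab]

theorem aInner_eq (lo : List String) :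
    ∀ (rest : List String) (idx score : Nat) (temp : List String),
      aInner lo rest idx score temp
        = (score + lcpLen rest (lo.drop idx), temp ++ rest.take (lcpLen rest (lo.drop idx))) := by
  intro rest
  induction rest with
  | nil => intro idx score temp; simp [aInner, lcpLen]
  | cons x rest ih =>
    intro idx score temp
    cases h : lo[idx]? with
    | none =>
      have hlen : lo.length ≤ idx := List.getElem?_eq_none_iff.mp h
      rw [List.drop_eq_nil_of_le hlen]
      simp [aInner, h, lcpLen]
    | some y =>
      have hidx : idx < lo.length := by
        have hs : (lo[idx]?).isSome := by rw [h]; rfl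
        simpa using hs
      have hval : lo[idx] = y := by
        have := h
        rw [List.getElem?_eq_getElem hidx] at this
        exact Option.some.inj this
      have hdrop : lo.drop idx = y :: lo.drop (idx + 1) := by
        rw [List.drop_eq_getElem_cons hidx, hval]
      rw [hdrop]
      simp only [aInner, h, lcpLen]
      by_cases hxy : x = y
      · simp only [if_pos hxy]
        rw [ih (idx + 1) (score + 1) (temp ++ [x])]
        simp only [Prod.mk.injEq, List.take_succ_cons, List.append_assoc, List.singleton_append]
        exact ⟨by omega, by trivial⟩
      · simp [hxy]

theorem stepmax (sh : List String) (L M : Nat) :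
    (if L > M then (L, sh.take L) else (M, sh.take M)) = (max M L, sh.take (max M L)) := by
  by_cases h : L > M
  · rw [if_pos h, Nat.max_eq_right (by omega)]
  · rw [if_neg h, Nat.max_eq_left (by omega)]

theorem foldA (sh lo : List String) :
    ∀ (starts : List Nat) (M : Nat),
      starts.foldl
        (fun (acc : Nat × List String) start =>
          if (aInner lo sh start 0 []).1 > acc.1 then aInner lo sh start 0 [] else acc)
        (M, sh.take M)
      = (starts.foldl (fun b st => max b (lcpLen sh (lo.drop st))) M,
         sh.take (starts.foldl (fun b st => max b (lcpLen sh (lo.drop st))) M)) := by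
  intro starts
  induction starts with
  | nil => intro M; rfl
  | cons st sts ih =>
    intro M
    have hst : aInner lo sh st 0 []
        = (lcpLen sh (lo.drop st), sh.take (lcpLen sh (lo.drop st))) := by
      rw [aInner_eq]
      simp
    simp only [List.foldl_cons, hst]
    rw [stepmax, ih]

theorem drop_append_len {α : Type} (l1 l2 : List α) (i : Nat) :
    (l1 ++ l2).drop (l1.length + i) = l2.drop i := by
  rw [List.drop_append]
  simp

-- ===== VERDICT (by name: the statement is the Claim_ definition above) =====
theorem rhyme_section_spec : Claim_equal_rhyme_section := by
  intro p1 p2 _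
  unfold Spec_rhyme_section
  simp only [rhyme_section, rhyme_section_alt]
  set sh := if p1.length ≤ p2.length then p1 else p2 with hsh
  set lo := if p1.length ≤ p2.length then p2 else p1 with hlo
  have hA := foldA sh lo (List.range (lo.length - sh.length + 1)) 0
  rw [List.take_zero] at hA
  rw [hA]
  have hfun : (fun (b start : Nat) =>
      if (zArr (sh.map some ++ none :: lo.map some))[sh.length + 1 + start]?.getD 0 > b
      then (zArr (sh.map some ++ none :: lo.map some))[sh.length + 1 + start]?.getD 0 else b)
      = fun b st => max b (lcpLen sh (lo.drop st)) := by
    funext b start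
    have hdrop : (sh.map some ++ none :: lo.map some).drop (sh.length + 1 + start)
        = (lo.drop start).map some := by
      have h1 : sh.length + 1 + start = (sh.map some).length + (start + 1) := by
        rw [List.length_map]; omega
      rw [h1, drop_append_len, List.drop_succ_cons, List.map_drop]
    have hz := zArr_correct (sh.map some ++ none :: lo.map some) (sh.length + 1 + start)
      (by omega)
    rw [hdrop, lcp_sep sh (lo.drop start) (lo.map some)] at hz
    rw [hz]
    rcases Nat.lt_or_ge b (lcpLen sh (lo.drop start)) with h | h
    · rw [if_pos h, Nat.max_eq_right (by omega)]
    · rw [if_neg (by omega), Nat.max_eq_left (by omega)]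
  rw [hfun]
  by_cases hemp : sh.isEmpty
  · rw [if_pos hemp]
    have hnil : sh = [] := List.isEmpty_iff.mp hemp
    simp [hnil]
  · rw [if_neg hemp]
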